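-- pv_equiv track=rewrite | github.com/muralimreddy/python3 | challanges/crossingSum.py | vs
-- ===== SOURCE A (Python) =====
-- def vs(m, a,b):
--     s = 0
--     for i in range (0, len(m)):
--         if i == a:
--             for k in range(0, len(m[i])):
--                 s += m[i][k]
--             continue
--         for j in range(0, len(m[i])):
--             if j == b:
--                 s += m[i][j]
--     return s
-- ===== SOURCE B (Python) =====
-- def vs(m, a, b):
--     s = sum(m[a]) if 0 <= a < len(m) else 0
--     for i, row in enumerate(m):
--         if i != a and 0 <= b < len(row):
--             s += row[b]
--     return s
-- ===== Notes on version B (the rewrite author's own statement) =====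
-- stated objective: faster
-- what changed: Instead of scanning every element of every row with nested index loops, B sums row a directly (when it exists) and makes one pass over the rows picking out the single column-b entry of each other row.
import Mathlib
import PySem

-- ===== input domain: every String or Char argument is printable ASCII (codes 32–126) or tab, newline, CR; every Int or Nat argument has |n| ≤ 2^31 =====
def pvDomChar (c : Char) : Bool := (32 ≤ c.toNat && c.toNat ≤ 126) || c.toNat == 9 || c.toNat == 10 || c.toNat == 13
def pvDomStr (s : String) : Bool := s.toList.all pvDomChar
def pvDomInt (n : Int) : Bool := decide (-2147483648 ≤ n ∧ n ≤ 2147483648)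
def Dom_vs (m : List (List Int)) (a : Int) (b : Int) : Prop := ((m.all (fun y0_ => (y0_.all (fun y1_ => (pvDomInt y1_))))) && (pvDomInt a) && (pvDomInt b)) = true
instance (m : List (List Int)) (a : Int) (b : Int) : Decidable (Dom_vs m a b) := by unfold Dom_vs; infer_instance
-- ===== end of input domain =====

-- B sums row a directly and makes one pass picking the column-b entry of each other row,
-- instead of A's nested index loops over every element (objective: faster, asymptotic).

-- ===== PORT A =====
def vs (m : List (List Int)) (a : Int) (b : Int) : Int :=
  (PySem.List.pyRange 0 m.length 1).foldl (fun s i =>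
    let row := PySem.List.pyGetD m i []
    if i = a then
      (PySem.List.pyRange 0 row.length 1).foldl (fun s k => s + PySem.List.pyGetD row k 0) s
    else
      (PySem.List.pyRange 0 row.length 1).foldl (fun s j =>
        if j = b then s + PySem.List.pyGetD row j 0 else s) s) 0

-- ===== PORT B =====
def vs_alt (m : List (List Int)) (a : Int) (b : Int) : Int :=
  let s0 : Int := if 0 ≤ a ∧ a < (m.length : Int) then (PySem.List.pyGetD m a []).sum else 0
  (PySem.List.enumerate m 0).foldl (fun s p =>
    if p.1 ≠ a ∧ 0 ≤ b ∧ b < (p.2.length : Int) then s + PySem.List.pyGetD p.2 b 0 else s) s0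

-- ===== PRECONDITION & SPEC =====
def Spec_vs (m : List (List Int)) (a : Int) (b : Int) (out : Int) : Prop := out = vs_alt m a b
instance (m : List (List Int)) (a : Int) (b : Int) (out : Int) : Decidable (Spec_vs m a b out) := by unfold Spec_vs; infer_instance

-- ===== CLAIM (what is proved, stated in full; the proofs are below) =====
def Claim_equal_vs : Prop := ∀ (m : List (List Int)) (a : Int) (b : Int), Dom_vs m a b → Spec_vs m a b (vs m a b)

-- ===== LEMMAS AND PROOFS =====

-- fold of additive body = init + sum of contributions
theorem pv_foldl_add (h : Int → Int) (l : List Int) (init : Int) :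
    l.foldl (fun s j => s + h j) init = init + (l.map h).sum := by
  induction l generalizing init with
  | nil => simp
  | cons x xs ih => simp [List.foldl, ih, add_assoc]

theorem pv_sum_zero (g : Int → Int) (b : Int) (l : List Int) (hne : ∀ j ∈ l, j ≠ b) :
    (l.map (fun j => if j = b then g j else 0)).sum = 0 := by
  apply List.sum_eq_zero
  intro x hx
  simp only [List.mem_map] at hx
  obtain ⟨j, hj, rfl⟩ := hx
  simp [hne j hj]

-- sum over range of a one-hot contribution
theorem pv_sum_ite_range (g : Int → Int) (b lo hi : Int) :
    ((PySem.List.pyRange lo hi 1).map (fun j => if j = b then g j else 0)).sum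
      = if lo ≤ b ∧ b < hi then g b else 0 := by
  by_cases h : lo ≤ b ∧ b < hi
  · obtain ⟨h1, h2⟩ := h
    rw [PySem.List.pyRange_one_append lo b hi h1 (le_of_lt h2),
        PySem.List.pyRange_one_cons h2]
    simp only [List.map_append, List.sum_append, List.map_cons, List.sum_cons]
    rw [pv_sum_zero g b _ (fun j hj => by
          rw [PySem.List.mem_pyRange_one] at hj; omega),
        pv_sum_zero g b _ (fun j hj => by
          rw [PySem.List.mem_pyRange_one] at hj; omega)]
    simp [h1, h2]
  · rw [if_neg h, pv_sum_zero g b _ (fun j hj => by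
      rw [PySem.List.mem_pyRange_one] at hj; intro hjb; exact h (by omega))]

-- A's row-a inner loop adds the whole row
theorem pv_inner_sum (row : List Int) (s : Int) :
    (PySem.List.pyRange 0 row.length 1).foldl (fun s k => s + PySem.List.pyGetD row k 0) s
      = s + row.sum := by
  rw [PySem.List.foldl_pyRange_zero_pyGetD' row 0 (fun s x => s + x) s]
  induction row generalizing s with
  | nil => simp
  | cons x xs ih => simp [List.foldl, ih, add_assoc]

-- A's other-rows inner loop adds the column-b entry when it exists
theorem pv_inner_pick (row : List Int) (b s : Int) :
    (PySem.List.pyRange 0 row.length 1).foldl (fun s j =>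
        if j = b then s + PySem.List.pyGetD row j 0 else s) s
      = s + (if 0 ≤ b ∧ b < (row.length : Int) then PySem.List.pyGetD row b 0 else 0) := by
  have hbody : (fun (s j : Int) => if j = b then s + PySem.List.pyGetD row j 0 else s)
      = fun s j => s + (if j = b then PySem.List.pyGetD row j 0 else 0) := by
    funext s j; split_ifs with h <;> simp [h]
  rw [hbody, pv_foldl_add, pv_sum_ite_range]

-- ===== VERDICT (by name: the statement is the Claim_ definition above) =====
theorem vs_spec : Claim_equal_vs := by
  intro m a b _
  show vs m a b = vs_alt m a b
  unfold vs vs_alt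
  rw [PySem.List.enumerate_eq_map_pyRange m ([] : List Int)]
  simp only [PySem.List.len_eq, List.foldl_map]
  have hA : (fun (s i : Int) =>
      let row := PySem.List.pyGetD m i []
      if i = a then
        (PySem.List.pyRange 0 row.length 1).foldl (fun s k => s + PySem.List.pyGetD row k 0) s
      else
        (PySem.List.pyRange 0 row.length 1).foldl (fun s j =>
          if j = b then s + PySem.List.pyGetD row j 0 else s) s)
      = fun s i =>
        s + ((if i = a then (PySem.List.pyGetD m i []).sum else 0)
          + (if i ≠ a ∧ 0 ≤ b ∧ b < ((PySem.List.pyGetD m i []).length : Int)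
              then PySem.List.pyGetD (PySem.List.pyGetD m i []) b 0 else 0)) := by
    funext s i
    dsimp only
    by_cases h : i = a
    · rw [if_pos h, pv_inner_sum]
      simp [h]
    · rw [if_neg h, pv_inner_pick]
      simp [h]
  have hB : (fun (x y : Int) =>
      if y ≠ a ∧ 0 ≤ b ∧ b < (((PySem.List.pyGetD m y []).length : Int))
        then x + PySem.List.pyGetD (PySem.List.pyGetD m y []) b 0 else x)
      = fun x y => x + (if y ≠ a ∧ 0 ≤ b ∧ b < (((PySem.List.pyGetD m y []).length : Int))
          then PySem.List.pyGetD (PySem.List.pyGetD m y []) b 0 else 0) := by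
    funext x y; split_ifs with h <;> simp
  rw [hA, hB]
  simp only [pv_foldl_add]
  have hsplit : ((PySem.List.pyRange 0 (m.length : Int) 1).map (fun i =>
      (if i = a then (PySem.List.pyGetD m i []).sum else 0)
        + (if i ≠ a ∧ 0 ≤ b ∧ b < ((PySem.List.pyGetD m i []).length : Int)
            then PySem.List.pyGetD (PySem.List.pyGetD m i []) b 0 else 0))).sum
      = ((PySem.List.pyRange 0 (m.length : Int) 1).map (fun i =>
          if i = a then (PySem.List.pyGetD m i []).sum else 0)).sum
        + ((PySem.List.pyRange 0 (m.length : Int) 1).map (fun i =>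
          if i ≠ a ∧ 0 ≤ b ∧ b < ((PySem.List.pyGetD m i []).length : Int)
            then PySem.List.pyGetD (PySem.List.pyGetD m i []) b 0 else 0)).sum := by
    induction (PySem.List.pyRange 0 (m.length : Int) 1) with
    | nil => simp
    | cons x xs ih => simp [ih]; ring
  rw [hsplit, pv_sum_ite_range (fun i => (PySem.List.pyGetD m i []).sum) a 0 (m.length : Int)]
  ring
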